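-- pv_equiv track=rewrite | github.com/TopherNie/toy-project | python/find_largest/hand_highlight.py | get_win_card_indexes
-- ===== SOURCE A (Python) =====
-- CARD_RANKS_ORIGINAL = '23456789TJQKA'
--
-- def get_card_index(card_arr, find_card, i):
--     count = 0
--     for j, card in enumerate(card_arr):
--         # String contains
--         if find_card in card:
--             if count == i:
--                 return j
--             count += 1
--     return -1
--
-- def get_win_card_indexes(hand, card_ranks, rcount_dict, flush_suit, is_straight):
--     res = []
--     for rank in card_ranks:
--         card = CARD_RANKS_ORIGINAL[rank]
--         if flush_suit:
--             card += flush_suit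
--         if is_straight or flush_suit:
--             res.append(get_card_index(hand, card, 0))
--         else:
--             r_count = rcount_dict[rank]
--             multiple_indexes = [get_card_index(hand, card, i) for i in range(r_count)]
--             res += multiple_indexes
--     return sorted(res[: 5])
-- ===== SOURCE B (Python) =====
-- CARD_RANKS_ORIGINAL = '23456789TJQKA'
--
-- def get_win_card_indexes(hand, card_ranks, rcount_dict, flush_suit, is_straight):
--     res = []
--     for rank in card_ranks:
--         needle = CARD_RANKS_ORIGINAL[rank] + (flush_suit if flush_suit else '')
--         # one scan of the hand per rank: all matching indexes in order
--         matches = [j for j, c in enumerate(hand) if needle in c]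
--         if is_straight or flush_suit:
--             res.append(matches[0] if matches else -1)
--         else:
--             n = max(0, rcount_dict[rank])
--             res += matches[:n] + [-1] * (n - len(matches))
--     return sorted(res[:5])
-- ===== Notes on version B (the rewrite author's own statement) =====
-- stated objective: alternative
-- what changed: B scans the hand once per rank, collecting the ordered list of all matching indexes, then takes the head (or a slice padded with -1) instead of A's get_card_index helper that rescans the hand from the start for every occurrence number i in range(rcount).
import Mathlib
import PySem

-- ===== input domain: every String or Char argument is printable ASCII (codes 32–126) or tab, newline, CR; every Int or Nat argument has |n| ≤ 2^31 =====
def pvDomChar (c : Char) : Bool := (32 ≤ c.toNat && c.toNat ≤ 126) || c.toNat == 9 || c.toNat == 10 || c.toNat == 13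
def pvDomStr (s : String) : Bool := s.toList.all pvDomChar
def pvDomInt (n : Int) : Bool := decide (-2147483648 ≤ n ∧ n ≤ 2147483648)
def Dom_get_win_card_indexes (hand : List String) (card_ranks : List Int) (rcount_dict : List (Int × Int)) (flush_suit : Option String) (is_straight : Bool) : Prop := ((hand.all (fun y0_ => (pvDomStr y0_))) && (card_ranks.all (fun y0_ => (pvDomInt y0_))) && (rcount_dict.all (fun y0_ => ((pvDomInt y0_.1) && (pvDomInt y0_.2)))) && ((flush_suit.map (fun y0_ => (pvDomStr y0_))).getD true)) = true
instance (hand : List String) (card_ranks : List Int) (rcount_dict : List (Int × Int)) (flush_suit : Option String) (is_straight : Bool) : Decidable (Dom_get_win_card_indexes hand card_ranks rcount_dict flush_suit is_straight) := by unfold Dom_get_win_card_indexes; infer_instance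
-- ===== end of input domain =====

-- B replaces A's restart-from-scratch occurrence search (get_card_index rescans the hand for each
-- occurrence number) by a single scan per rank that collects all matching indexes, then slices/pads.

def CARD_RANKS_ORIGINAL : String := "23456789TJQKA"

-- Python truthiness of an Optional[str]: None and "" are falsy (shared by both ports).
def pvTruthy (o : Option String) : Bool :=
  match o with
  | none => false
  | some s => !s.toList.isEmpty

-- ===== PORT A =====
-- the 'for j, card in enumerate(card_arr)' loop of get_card_index, with its running count
def gciLoop (pairs : List (Int × String)) (find_card : List Char) (i : Int) (count : Int) : Int :=
  match pairs with
  | [] => -1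
  | (j, card) :: rest =>
    if PySem.Chars.isIn find_card card.toList then
      if count = i then j else gciLoop rest find_card i (count + 1)
    else gciLoop rest find_card i count

def get_card_index (card_arr : List String) (find_card : List Char) (i : Int) : Int :=
  gciLoop (PySem.List.enumerate card_arr 0) find_card i 0

def get_win_card_indexes (hand : List String) (card_ranks : List Int) (rcount_dict : List (Int × Int)) (flush_suit : Option String) (is_straight : Bool) : List Int :=
  let res := card_ranks.foldl (fun res rank =>
    let card0 := (PySem.Str.pyGet? CARD_RANKS_ORIGINAL rank).getD '?'  -- Pre_ keeps rank in range
    let card := if pvTruthy flush_suit then card0 :: (flush_suit.getD "").toList else [card0]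
    if is_straight || pvTruthy flush_suit then
      res ++ [get_card_index hand card 0]
    else
      let r_count := PySem.Dict.getD ⟨rcount_dict⟩ rank 0  -- Pre_ keeps rank a key
      res ++ (PySem.List.pyRange 0 r_count 1).map (fun i => get_card_index hand card i)) []
  PySem.List.sorted (PySem.List.slice res none (some 5)) id false

-- ===== PORT B =====
def get_win_card_indexes_alt (hand : List String) (card_ranks : List Int) (rcount_dict : List (Int × Int)) (flush_suit : Option String) (is_straight : Bool) : List Int :=
  let res := card_ranks.foldl (fun res rank =>
    let needle := ((PySem.Str.pyGet? CARD_RANKS_ORIGINAL rank).getD '?') ::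
      (if pvTruthy flush_suit then (flush_suit.getD "").toList else [])
    let hits := ((PySem.List.enumerate hand 0).filter
      (fun p => PySem.Chars.isIn needle p.2.toList)).map Prod.fst
    if is_straight || pvTruthy flush_suit then
      res ++ [hits.headD (-1)]
    else
      let n := max 0 (PySem.Dict.getD ⟨rcount_dict⟩ rank 0)
      res ++ (PySem.List.slice hits none (some n) ++
        List.replicate (n - (hits.length : Int)).toNat (-1))) []
  PySem.List.sorted (PySem.List.slice res none (some 5)) id false

-- ===== PRECONDITION & SPEC =====
-- Pre_ excludes exactly where the Python A raises: a rank outside Python's index range for the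
-- 13-char rank string (IndexError), and — when the non-straight, non-flush branch runs — a rank
-- missing from rcount_dict (KeyError).
def Pre_get_win_card_indexes (hand : List String) (card_ranks : List Int) (rcount_dict : List (Int × Int)) (flush_suit : Option String) (is_straight : Bool) : Prop :=
  ∀ r ∈ card_ranks, (-13 ≤ r ∧ r < 13) ∧
    (is_straight = false ∧ pvTruthy flush_suit = false → r ∈ rcount_dict.map Prod.fst)
instance (hand : List String) (card_ranks : List Int) (rcount_dict : List (Int × Int)) (flush_suit : Option String) (is_straight : Bool) : Decidable (Pre_get_win_card_indexes hand card_ranks rcount_dict flush_suit is_straight) := by unfold Pre_get_win_card_indexes; infer_instance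

def pvWitness_get_win_card_indexes : List String × List Int × (List (Int × Int)) × Option String × Bool :=
  (["7h", "7s", "Kd"], [5, 11], [(5, 2), (11, 1)], none, false)

def Spec_get_win_card_indexes (hand : List String) (card_ranks : List Int) (rcount_dict : List (Int × Int)) (flush_suit : Option String) (is_straight : Bool) (out : List Int) : Prop := out = get_win_card_indexes_alt hand card_ranks rcount_dict flush_suit is_straight
instance (hand : List String) (card_ranks : List Int) (rcount_dict : List (Int × Int)) (flush_suit : Option String) (is_straight : Bool) (out : List Int) : Decidable (Spec_get_win_card_indexes hand card_ranks rcount_dict flush_suit is_straight out) := by unfold Spec_get_win_card_indexes; infer_instance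

-- ===== CLAIM =====
def Claim_equal_get_win_card_indexes : Prop := ∀ (hand : List String) (card_ranks : List Int) (rcount_dict : List (Int × Int)) (flush_suit : Option String) (is_straight : Bool), Dom_get_win_card_indexes hand card_ranks rcount_dict flush_suit is_straight → Pre_get_win_card_indexes hand card_ranks rcount_dict flush_suit is_straight → Spec_get_win_card_indexes hand card_ranks rcount_dict flush_suit is_straight (get_win_card_indexes hand card_ranks rcount_dict flush_suit is_straight)

-- ===== LEMMAS AND PROOFS =====

-- A's counting scan returns the (i - count)-th member of the ordered list of matching indexes.
lemma gciLoop_eq (pairs : List (Int × String)) (f : List Char) (i count : Int) :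
    gciLoop pairs f i count =
      if i < count then -1
      else ((((pairs.filter (fun p => PySem.Chars.isIn f p.2.toList)).map Prod.fst))[(i - count).toNat]?).getD (-1) := by
  induction pairs generalizing count with
  | nil => simp [gciLoop]
  | cons hd tl ih =>
    obtain ⟨j, card⟩ := hd
    by_cases hin : PySem.Chars.isIn f card.toList
    · by_cases hci : count = i
      · subst hci
        simp [gciLoop, hin]
      · rw [show gciLoop ((j, card) :: tl) f i count = gciLoop tl f i (count + 1) by
          simp [gciLoop, hin, hci], ih]
        by_cases hlt : i < count
        · rw [if_pos (by omega), if_pos hlt]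
        · rw [if_neg (by omega), if_neg hlt]
          have h1 : i - count = (i - (count + 1)) + 1 := by omega
          have h2 : (i - count).toNat = (i - (count + 1)).toNat + 1 := by omega
          simp [hin, h2]
    · rw [show gciLoop ((j, card) :: tl) f i count = gciLoop tl f i count by
        simp [gciLoop, hin], ih]
      simp [hin]

lemma range_map_getD (l : List Int) (n : Nat) :
    (List.range n).map (fun k => (l[k]?).getD (-1)) = l.take n ++ List.replicate (n - l.length) (-1) := by
  induction n with
  | zero => simp
  | succ n ih =>
    rw [List.range_succ, List.map_append, ih]
    simp only [List.map_cons, List.map_nil]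
    by_cases h : n < l.length
    · have h1 : l[n]? = some l[n] := List.getElem?_eq_getElem h
      have h2 : n + 1 - l.length = 0 := by omega
      have h3 : n - l.length = 0 := by omega
      rw [h1, h2, h3, List.take_add_one, h1]
      simp
    · have h1 : l[n]? = none := List.getElem?_eq_none (by omega)
      have h2 : n + 1 - l.length = (n - l.length) + 1 := by omega
      rw [h1, h2, List.replicate_succ',
          List.take_of_length_le (by omega : l.length ≤ n),
          List.take_of_length_le (by omega : l.length ≤ n + 1)]
      simp

lemma headD_eq_getElem? (l : List Int) : (l[0]?).getD (-1) = l.headD (-1) := by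
  cases l <;> rfl

theorem get_win_card_indexes_spec : Claim_equal_get_win_card_indexes := by
  intro hand card_ranks rcount_dict flush_suit is_straight _ _
  unfold Spec_get_win_card_indexes get_win_card_indexes get_win_card_indexes_alt
  have hf : ∀ (res : List Int) (rank : Int),
      (fun res rank =>
        let card0 := (PySem.Str.pyGet? CARD_RANKS_ORIGINAL rank).getD '?'
        let card := if pvTruthy flush_suit then card0 :: (flush_suit.getD "").toList else [card0]
        if is_straight || pvTruthy flush_suit then
          res ++ [get_card_index hand card 0]
        else
          let r_count := PySem.Dict.getD ⟨rcount_dict⟩ rank 0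
          res ++ (PySem.List.pyRange 0 r_count 1).map (fun i => get_card_index hand card i)) res rank =
      (fun res rank =>
        let needle := ((PySem.Str.pyGet? CARD_RANKS_ORIGINAL rank).getD '?') ::
          (if pvTruthy flush_suit then (flush_suit.getD "").toList else [])
        let hits := ((PySem.List.enumerate hand 0).filter
          (fun p => PySem.Chars.isIn needle p.2.toList)).map Prod.fst
        if is_straight || pvTruthy flush_suit then
          res ++ [hits.headD (-1)]
        else
          let n := max 0 (PySem.Dict.getD ⟨rcount_dict⟩ rank 0)
          res ++ (PySem.List.slice hits none (some n) ++
            List.replicate (n - (hits.length : Int)).toNat (-1))) res rank := by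
    intro res rank
    dsimp only
    have hcard : (if pvTruthy flush_suit
          then ((PySem.Str.pyGet? CARD_RANKS_ORIGINAL rank).getD '?') :: (flush_suit.getD "").toList
          else [(PySem.Str.pyGet? CARD_RANKS_ORIGINAL rank).getD '?']) =
        ((PySem.Str.pyGet? CARD_RANKS_ORIGINAL rank).getD '?') ::
          (if pvTruthy flush_suit then (flush_suit.getD "").toList else []) := by
      by_cases h : pvTruthy flush_suit <;> simp [h]
    rw [hcard]
    set needle := ((PySem.Str.pyGet? CARD_RANKS_ORIGINAL rank).getD '?') ::
      (if pvTruthy flush_suit then (flush_suit.getD "").toList else []) with hneedle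
    set hits := ((PySem.List.enumerate hand 0).filter
      (fun p => PySem.Chars.isIn needle p.2.toList)).map Prod.fst with hhits
    have hgci : ∀ i : Int, 0 ≤ i → get_card_index hand needle i = (hits[i.toNat]?).getD (-1) := by
      intro i hi
      rw [get_card_index, gciLoop_eq, if_neg (by omega)]
      simp [hhits]
    split_ifs with h
    · rw [hgci 0 (by omega)]
      simp [headD_eq_getElem?]
    · congr 1
      set r := PySem.Dict.getD (⟨rcount_dict⟩ : PySem.Dict Int Int) rank 0 with hr
      have hmap : (PySem.List.pyRange 0 r 1).map (fun i => get_card_index hand needle i) =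
          (List.range r.toNat).map (fun k => (hits[k]?).getD (-1)) := by
        rw [PySem.List.pyRange_one]
        rw [List.map_map, show r - 0 = r by ring]
        apply List.map_congr_left
        intro k _
        simp only [Function.comp]
        rw [hgci (0 + (k : Int)) (by omega)]
        norm_num
      rw [hmap, range_map_getD]
      rw [PySem.List.slice_to hits (by omega : (0:Int) ≤ max 0 r)]
      have h1 : (max 0 r).toNat = r.toNat := by omega
      have h2 : (max 0 r - (hits.length : Int)).toNat = r.toNat - hits.length := by omega
      rw [h1, h2]
  dsimp only
  exact congrArg (fun l => PySem.List.sorted (PySem.List.slice l none (some 5)) id false)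
    (congrArg (fun f => List.foldl f ([] : List Int) card_ranks)
      (funext fun res => funext fun rank => hf res rank))
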